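-- pv_equiv track=rewrite | github.com/ErickCoder254ke/PesaCoreDB | rdbms/sql/executor.py | _create_joined_row
-- ===== SOURCE A (Python) =====
-- from typing import List, Dict, Any, Optional
--
-- def _create_joined_row(left_row: Optional[Dict[str, Any]], right_row: Optional[Dict[str, Any]],
--                       left_table_name: str, right_table_name: str,
--                       columns: Optional[List[str]]) -> Dict[str, Any]:
--     """Create a joined row from left and right rows (handles NULL for outer joins).
--
--     Args:
--         left_row: Left table row (None for unmatched in RIGHT JOIN)
--         right_row: Right table row (None for unmatched in LEFT JOIN)
--         left_table_name: Name of left table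
--         right_table_name: Name of right table
--         columns: List of columns to project (None for all columns)
--
--     Returns:
--         Joined row dictionary
--     """
--     # Build full joined row with table prefixes
--     joined_row = {}
--
--     if left_row:
--         for col, val in left_row.items():
--             joined_row[f"{left_table_name}.{col}"] = val
--     else:
--         # Fill with NULLs for unmatched left row
--         # We don't know the columns, but we'll handle this in projection
--         pass
--
--     if right_row:
--         for col, val in right_row.items():
--             joined_row[f"{right_table_name}.{col}"] = val
--     else:
--         # Fill with NULLs for unmatched right row
--         pass
--
--     # Project requested columns
--     if columns:
--         projected_row = {}
--         for col in columns:
--             # Check if column has table prefix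
--             if '.' in col:
--                 if col in joined_row:
--                     projected_row[col] = joined_row[col]
--                 else:
--                     # Column not found - set to NULL (for outer join)
--                     projected_row[col] = None
--             else:
--                 # Try to find column in either table
--                 left_key = f"{left_table_name}.{col}"
--                 right_key = f"{right_table_name}.{col}"
--
--                 if left_key in joined_row:
--                     projected_row[col] = joined_row[left_key]
--                 elif right_key in joined_row:
--                     projected_row[col] = joined_row[right_key]
--                 else:
--                     # Column not found - set to NULL (for outer join)
--                     projected_row[col] = None
--         return projected_row
--     else:
--         return joined_row
-- ===== SOURCE B (Python) =====
-- from typing import List, Dict, Any, Optional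
--
--
-- def _create_joined_row(left_row: Optional[Dict[str, Any]], right_row: Optional[Dict[str, Any]],
--                        left_table_name: str, right_table_name: str,
--                        columns: Optional[List[str]]) -> Dict[str, Any]:
--     """Same result as the original, but the projection path resolves each
--     requested column directly against the two rows (prefix test + dict lookup)
--     instead of first materialising the fully prefixed joined row."""
--
--     def resolve(key):
--         # (present, value) the prefixed joined row would hold at `key`;
--         # the right row overwrites the left one, so it is consulted first.
--         if right_row:
--             rp = right_table_name + "."
--             rest = key[len(rp):]
--             if key.startswith(rp) and rest in right_row:
--                 return True, right_row[rest]
--         if left_row: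
--             lp = left_table_name + "."
--             rest = key[len(lp):]
--             if key.startswith(lp) and rest in left_row:
--                 return True, left_row[rest]
--         return False, None
--
--     if columns:
--         projected = {}
--         for col in columns:
--             if '.' in col:
--                 projected[col] = resolve(col)[1]
--             else:
--                 found, v = resolve(left_table_name + "." + col)
--                 if not found:
--                     found, v = resolve(right_table_name + "." + col)
--                 projected[col] = v
--         return projected
--
--     joined = {}
--     if left_row:
--         for c, v in left_row.items():
--             joined[left_table_name + "." + c] = v
--     if right_row:
--         for c, v in right_row.items():
--             joined[right_table_name + "." + c] = v
--     return joined
-- ===== Notes on version B (the rewrite author's own statement) =====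
-- stated objective: faster
-- what changed: The projection path no longer materialises the fully prefixed joined dict: each requested column is resolved directly against the two input rows by a prefix test plus a direct lookup of the key's suffix (right row consulted first, mirroring the overwrite); the unprojected path is unchanged.
import Mathlib
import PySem

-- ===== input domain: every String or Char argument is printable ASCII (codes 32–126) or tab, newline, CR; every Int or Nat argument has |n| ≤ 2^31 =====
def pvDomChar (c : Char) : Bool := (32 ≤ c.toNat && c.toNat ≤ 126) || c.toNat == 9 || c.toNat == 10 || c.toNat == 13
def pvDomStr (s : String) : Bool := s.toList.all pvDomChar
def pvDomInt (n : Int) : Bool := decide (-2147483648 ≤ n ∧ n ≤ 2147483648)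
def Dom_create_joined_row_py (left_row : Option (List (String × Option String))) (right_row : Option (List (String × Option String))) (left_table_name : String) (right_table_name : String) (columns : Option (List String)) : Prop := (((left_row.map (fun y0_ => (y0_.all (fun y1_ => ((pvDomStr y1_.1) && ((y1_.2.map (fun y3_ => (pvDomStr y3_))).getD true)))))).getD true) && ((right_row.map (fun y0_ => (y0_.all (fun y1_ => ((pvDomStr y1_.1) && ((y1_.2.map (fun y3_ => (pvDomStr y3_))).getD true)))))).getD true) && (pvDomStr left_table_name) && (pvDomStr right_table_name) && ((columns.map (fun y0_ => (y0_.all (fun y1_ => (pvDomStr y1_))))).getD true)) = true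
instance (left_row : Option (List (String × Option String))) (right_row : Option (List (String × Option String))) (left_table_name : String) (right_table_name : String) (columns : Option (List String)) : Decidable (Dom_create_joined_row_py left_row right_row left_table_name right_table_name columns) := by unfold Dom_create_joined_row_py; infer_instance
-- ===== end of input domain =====

-- B changes the projection path: instead of first materialising the fully prefixed joined
-- dict and looking columns up in it, it resolves each requested column directly against the
-- two input rows by a prefix test plus a suffix lookup (objective: faster by a constant
-- factor on the projection path, measured; same asymptotic cost).

-- ===== PORT A =====
-- the full prefixed joined dict A always builds (left row inserted first, right row second)
def pvJoinDict (left_row right_row : Option (List (String × Option String)))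
    (left_table_name right_table_name : String) : PySem.Dict String (Option String) :=
  let j0 : PySem.Dict String (Option String) := PySem.Dict.empty
  let j1 := match left_row with
    | some l => if l.isEmpty then j0
                else l.foldl (fun d (cv : String × Option String) => d.insert (left_table_name ++ "." ++ cv.1) cv.2) j0
    | none => j0
  match right_row with
  | some r => if r.isEmpty then j1
              else r.foldl (fun d (cv : String × Option String) => d.insert (right_table_name ++ "." ++ cv.1) cv.2) j1
  | none => j1

def create_joined_row_py (left_row : Option (List (String × Option String))) (right_row : Option (List (String × Option String))) (left_table_name : String) (right_table_name : String) (columns : Option (List String)) : List (String × Option String) :=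
  let joined := pvJoinDict left_row right_row left_table_name right_table_name
  match columns with
  | some cs =>
    if cs.isEmpty then joined.items
    else (cs.foldl (fun p col =>
      if PySem.Str.isIn "." col then
        match joined.get? col with
        | some v => p.insert col v
        | none => p.insert col none
      else
        let left_key := left_table_name ++ "." ++ col
        let right_key := right_table_name ++ "." ++ col
        if joined.contains left_key then p.insert col (joined.getD left_key none)
        else if joined.contains right_key then p.insert col (joined.getD right_key none)
        else p.insert col none) PySem.Dict.empty).items
  | none => joined.items

-- ===== PORT B =====
-- Source B's `resolve`: (present, value) the prefixed joined row would hold at `key`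
-- (right row consulted first, since it overwrites the left); prefix test + direct lookup
def pvAltResolve (left_row right_row : Option (List (String × Option String)))
    (left_table_name right_table_name : String) (key : String) : Bool × Option String :=
  match (match right_row with
         | some r =>
           if r.isEmpty then none
           else if PySem.Str.startswith key (right_table_name ++ ".") then
             r.find? (fun (cv : String × Option String) =>
               cv.1 == PySem.Str.slice key (some (PySem.Str.len (right_table_name ++ "."))) none)
           else none
         | none => none) with
  | some cv => (true, cv.2)
  | none =>
    match (match left_row with
           | some l =>
             if l.isEmpty then none
             else if PySem.Str.startswith key (left_table_name ++ ".") then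
               l.find? (fun (cv : String × Option String) =>
                 cv.1 == PySem.Str.slice key (some (PySem.Str.len (left_table_name ++ "."))) none)
             else none
           | none => none) with
    | some cv => (true, cv.2)
    | none => (false, none)

-- Source B's fall-through branch building the full prefixed dict
def pvAltFull (left_row right_row : Option (List (String × Option String)))
    (left_table_name right_table_name : String) : List (String × Option String) :=
  let j0 : PySem.Dict String (Option String) := PySem.Dict.empty
  let j1 := match left_row with
    | some l => if l.isEmpty then j0
                else l.foldl (fun d (cv : String × Option String) => d.insert (left_table_name ++ "." ++ cv.1) cv.2) j0
    | none => j0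
  (match right_row with
   | some r => if r.isEmpty then j1
               else r.foldl (fun d (cv : String × Option String) => d.insert (right_table_name ++ "." ++ cv.1) cv.2) j1
   | none => j1).items

def create_joined_row_py_alt (left_row : Option (List (String × Option String))) (right_row : Option (List (String × Option String))) (left_table_name : String) (right_table_name : String) (columns : Option (List String)) : List (String × Option String) :=
  match columns with
  | some cs =>
    if cs.isEmpty then pvAltFull left_row right_row left_table_name right_table_name
    else (cs.foldl (fun p col =>
      if PySem.Str.isIn "." col then
        p.insert col (pvAltResolve left_row right_row left_table_name right_table_name col).2
      else
        let fv := pvAltResolve left_row right_row left_table_name right_table_name (left_table_name ++ "." ++ col)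
        let fv2 := if fv.1 then fv
                   else pvAltResolve left_row right_row left_table_name right_table_name (right_table_name ++ "." ++ col)
        p.insert col fv2.2) PySem.Dict.empty).items
  | none => pvAltFull left_row right_row left_table_name right_table_name

-- ===== PRECONDITION & SPEC =====
-- Pre_ excludes association lists whose keys repeat: a Python dict cannot have duplicate
-- keys, so such lists represent no input of the Python programs.
def Pre_create_joined_row_py (left_row : Option (List (String × Option String))) (right_row : Option (List (String × Option String))) (left_table_name : String) (right_table_name : String) (columns : Option (List String)) : Prop :=
  ((left_row.getD []).map Prod.fst).Nodup ∧ ((right_row.getD []).map Prod.fst).Nodup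
instance (left_row : Option (List (String × Option String))) (right_row : Option (List (String × Option String))) (left_table_name : String) (right_table_name : String) (columns : Option (List String)) : Decidable (Pre_create_joined_row_py left_row right_row left_table_name right_table_name columns) := by unfold Pre_create_joined_row_py; infer_instance

def pvWitness_create_joined_row_py : (Option (List (String × Option String))) × (Option (List (String × Option String))) × String × String × Option (List String) :=
  (some [("a", some "1")], some [("b", none)], "t", "u", some ["a", "u.b", "c"])

def Spec_create_joined_row_py (left_row : Option (List (String × Option String))) (right_row : Option (List (String × Option String))) (left_table_name : String) (right_table_name : String) (columns : Option (List String)) (out : List (String × Option String)) : Prop := out = create_joined_row_py_alt left_row right_row left_table_name right_table_name columns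
instance (left_row : Option (List (String × Option String))) (right_row : Option (List (String × Option String))) (left_table_name : String) (right_table_name : String) (columns : Option (List String)) (out : List (String × Option String)) : Decidable (Spec_create_joined_row_py left_row right_row left_table_name right_table_name columns out) := by unfold Spec_create_joined_row_py; infer_instance

-- ===== CLAIM (what is proved, stated in full; the proofs are below) =====
def Claim_equal_create_joined_row_py : Prop := ∀ (left_row : Option (List (String × Option String))) (right_row : Option (List (String × Option String))) (left_table_name : String) (right_table_name : String) (columns : Option (List String)), Dom_create_joined_row_py left_row right_row left_table_name right_table_name columns → Pre_create_joined_row_py left_row right_row left_table_name right_table_name columns → Spec_create_joined_row_py left_row right_row left_table_name right_table_name columns (create_joined_row_py left_row right_row left_table_name right_table_name columns)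

-- ===== LEMMAS AND PROOFS =====

-- proof-side abbreviation: one row's contribution, as the scan A's dict semantics induces
def pvScan (row? : Option (List (String × Option String))) (pfx k : String) :
    Option (String × Option String) :=
  match row? with
  | some r => if r.isEmpty then none
              else r.find? (fun (cv : String × Option String) => pfx ++ "." ++ cv.1 == k)
  | none => none

-- keys with a fixed prefix are still distinct
theorem pv_nodup_prefixed (pfx : String) (l : List (String × Option String))
    (h : (l.map Prod.fst).Nodup) : (l.map (fun (cv : String × Option String) => pfx ++ "." ++ cv.1)).Nodup := by
  have : (l.map (fun (cv : String × Option String) => pfx ++ "." ++ cv.1)) = (l.map Prod.fst).map (fun c => pfx ++ "." ++ c) := by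
    simp [List.map_map, Function.comp]
  rw [this]
  exact h.map (fun a b hab => by
    have := (String.append_right_inj (pfx ++ ".")).mp hab
    simpa using this)

-- get? after a prefixed-insert loop = first match in the list (keys distinct)
theorem pv_get?_foldl (pfx : String) (l : List (String × Option String))
    (d : PySem.Dict String (Option String)) (k : String)
    (h : (l.map (fun (cv : String × Option String) => pfx ++ "." ++ cv.1)).Nodup) :
    (l.foldl (fun d (cv : String × Option String) => d.insert (pfx ++ "." ++ cv.1) cv.2) d).get? k
    = match l.find? (fun (cv : String × Option String) => pfx ++ "." ++ cv.1 == k) with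
      | some cv => some cv.2
      | none => d.get? k := by
  induction l generalizing d with
  | nil => rfl
  | cons a t ih =>
    simp only [List.map_cons, List.nodup_cons] at h
    simp only [List.foldl_cons, List.find?_cons]
    by_cases hk : pfx ++ "." ++ a.1 = k
    · subst hk
      have ht : t.find? (fun (cv : String × Option String) => pfx ++ "." ++ cv.1 == (pfx ++ "." ++ a.1)) = none := by
        rw [List.find?_eq_none]
        intro x hx
        simp only [beq_iff_eq]
        intro hc
        exact h.1 (hc ▸ List.mem_map_of_mem hx)
      rw [ih _ h.2, ht]
      simp [PySem.Dict.get?_insert_self]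
    · have hne : (pfx ++ "." ++ a.1 == k) = false := by simp [hk]
      rw [hne, ih _ h.2]
      cases t.find? (fun (cv : String × Option String) => pfx ++ "." ++ cv.1 == k) with
      | none => simp [PySem.Dict.get?_insert_of_ne _ _ (fun hc => hk hc.symm)]
      | some cv => rfl

-- what A's joined dict holds at any key: right row's scan first, then the left row's
theorem pv_get?_join (left_row right_row : Option (List (String × Option String)))
    (lt rt : String) (k : String)
    (hl : ((left_row.getD []).map Prod.fst).Nodup)
    (hr : ((right_row.getD []).map Prod.fst).Nodup) :
    (pvJoinDict left_row right_row lt rt).get? k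
    = match pvScan right_row rt k with
      | some cv => some cv.2
      | none =>
        match pvScan left_row lt k with
        | some cv => some cv.2
        | none => none := by
  have base : ∀ (lr : Option (List (String × Option String)))
      (h : ((lr.getD []).map Prod.fst).Nodup),
      (match lr with
       | some l => if l.isEmpty then (PySem.Dict.empty : PySem.Dict String (Option String))
                   else l.foldl (fun d (cv : String × Option String) => d.insert (lt ++ "." ++ cv.1) cv.2) PySem.Dict.empty
       | none => PySem.Dict.empty).get? k
      = match pvScan lr lt k with
        | some cv => some cv.2
        | none => none := by
    intro lr h
    unfold pvScan
    cases lr with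
    | none => rfl
    | some l =>
      by_cases he : l.isEmpty
      · dsimp only
        rw [if_pos he, if_pos he]
        rfl
      · dsimp only
        rw [if_neg he, if_neg he]
        rw [pv_get?_foldl lt l PySem.Dict.empty k (pv_nodup_prefixed lt l h)]
        cases l.find? (fun (cv : String × Option String) => lt ++ "." ++ cv.1 == k) <;> rfl
  unfold pvJoinDict
  cases right_row with
  | none => exact base left_row hl
  | some r =>
    unfold pvScan
    by_cases he : r.isEmpty
    · dsimp only
      rw [if_pos he, if_pos he]
      exact base left_row hl
    · dsimp only
      rw [if_neg he, if_neg he]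
      rw [pv_get?_foldl rt r _ k (pv_nodup_prefixed rt r hr)]
      cases r.find? (fun (cv : String × Option String) => rt ++ "." ++ cv.1 == k) with
      | some cv => rfl
      | none => rw [base left_row hl]; rfl

-- a prefixed full-key scan is the same as B's prefix test + suffix scan
theorem pv_find_prefix (pfx : String) (r : List (String × Option String)) (k : String) :
    (if PySem.Str.startswith k (pfx ++ ".") then
       r.find? (fun (cv : String × Option String) =>
         cv.1 == PySem.Str.slice k (some (PySem.Str.len (pfx ++ "."))) none)
     else none)
    = r.find? (fun (cv : String × Option String) => pfx ++ "." ++ cv.1 == k) := by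
  have hgen : ∀ (p : String), (PySem.Str.slice k (some (PySem.Str.len p)) none).toList
      = k.toList.drop p.toList.length := by
    intro p
    simp [PySem.Str.len]
  by_cases hs : PySem.Str.startswith k (pfx ++ ".") = true
  · simp only [hs, if_true]
    have hpre : (pfx ++ ".").toList <+: k.toList := by
      have := PySem.Str.startswith_eq k (pfx ++ ".")
      rw [this] at hs
      exact (PySem.Chars.startswith_iff _ _).mp hs
    congr 1
    funext cv
    have key_iff : pfx ++ "." ++ cv.1 = k ↔ cv.1 = PySem.Str.slice k (some (PySem.Str.len (pfx ++ "."))) none := by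
      constructor
      · intro h
        apply String.toList_inj.mp
        rw [hgen (pfx ++ "."), ← h]
        have h2 : (pfx ++ "." ++ cv.1).toList = (pfx ++ ".").toList ++ cv.1.toList := by
          rw [← String.toList_append]
        rw [h2, List.drop_left]
      · intro h
        apply String.toList_inj.mp
        rw [String.toList_append, h, hgen (pfx ++ ".")]
        obtain ⟨t, ht⟩ := hpre
        rw [← ht, List.drop_left]
    by_cases h : cv.1 = PySem.Str.slice k (some (PySem.Str.len (pfx ++ "."))) none
    · rw [show (cv.1 == PySem.Str.slice k (some (PySem.Str.len (pfx ++ "."))) none) = true from by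
          exact beq_iff_eq.mpr h,
        show (pfx ++ "." ++ cv.1 == k) = true from by exact beq_iff_eq.mpr (key_iff.mpr h)]
    · rw [show (cv.1 == PySem.Str.slice k (some (PySem.Str.len (pfx ++ "."))) none) = false from by
          exact beq_eq_false_iff_ne.mpr h,
        show (pfx ++ "." ++ cv.1 == k) = false from by
          exact beq_eq_false_iff_ne.mpr (fun hc => h (key_iff.mp hc))]
  · simp only [hs, if_false, Bool.false_eq_true]
    symm
    rw [List.find?_eq_none]
    intro cv _
    simp only [beq_iff_eq]
    intro hc
    apply hs
    rw [PySem.Str.startswith_eq, PySem.Chars.startswith_iff, ← hc]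
    exact ⟨cv.1.toList, by rw [← String.toList_append]⟩

-- B's resolve computes exactly (contains, getD none) of A's joined dict
theorem pv_resolve_join (left_row right_row : Option (List (String × Option String)))
    (lt rt : String) (k : String)
    (hl : ((left_row.getD []).map Prod.fst).Nodup)
    (hr : ((right_row.getD []).map Prod.fst).Nodup) :
    pvAltResolve left_row right_row lt rt k
    = ((pvJoinDict left_row right_row lt rt).contains k,
       (pvJoinDict left_row right_row lt rt).getD k none) := by
  rw [PySem.Dict.contains_eq_isSome_get?, PySem.Dict.getD_eq_get?_getD,
      pv_get?_join left_row right_row lt rt k hl hr]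
  clear hl hr
  unfold pvAltResolve
  have hR : (match right_row with
             | some r =>
               if r.isEmpty then none
               else if PySem.Str.startswith k (rt ++ ".") then
                 r.find? (fun (cv : String × Option String) =>
                   cv.1 == PySem.Str.slice k (some (PySem.Str.len (rt ++ "."))) none)
               else none
             | none => none)
      = pvScan right_row rt k := by
    unfold pvScan
    cases right_row with
    | none => rfl
    | some r =>
      by_cases he : r.isEmpty <;> simp only [he, if_true, if_false, Bool.false_eq_true]
      exact pv_find_prefix rt r k
  have hL : (match left_row with
             | some l =>
               if l.isEmpty then none
               else if PySem.Str.startswith k (lt ++ ".") then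
                 l.find? (fun (cv : String × Option String) =>
                   cv.1 == PySem.Str.slice k (some (PySem.Str.len (lt ++ "."))) none)
               else none
             | none => none)
      = pvScan left_row lt k := by
    unfold pvScan
    cases left_row with
    | none => rfl
    | some l =>
      by_cases he : l.isEmpty <;> simp only [he, if_true, if_false, Bool.false_eq_true]
      exact pv_find_prefix lt l k
  rw [hR, hL]
  cases pvScan right_row rt k with
  | some cv => rfl
  | none =>
    cases pvScan left_row lt k with
    | some cv => rfl
    | none => rfl

-- ===== VERDICT (by name: the statement is the Claim_ definition above) =====
theorem create_joined_row_py_spec : Claim_equal_create_joined_row_py := by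
  intro left_row right_row lt rt columns _ hpre
  obtain ⟨hl, hr⟩ := hpre
  unfold Spec_create_joined_row_py create_joined_row_py create_joined_row_py_alt
  have hfull : (pvJoinDict left_row right_row lt rt).items = pvAltFull left_row right_row lt rt := by
    unfold pvJoinDict pvAltFull
    rfl
  cases columns with
  | none => exact hfull
  | some cs =>
    by_cases he : cs.isEmpty
    · simp only [he, if_true]
      exact hfull
    · simp only [he, if_false, Bool.false_eq_true]
      congr 1
      apply List.foldl_ext
      intro p col _
      by_cases hdot : PySem.Str.isIn "." col = true
      · simp only [hdot, if_true, pv_resolve_join left_row right_row lt rt col hl hr]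
        rw [PySem.Dict.getD_eq_get?_getD]
        cases (pvJoinDict left_row right_row lt rt).get? col <;> rfl
      · simp only [hdot, if_false, Bool.false_eq_true,
            pv_resolve_join left_row right_row lt rt (lt ++ "." ++ col) hl hr,
            pv_resolve_join left_row right_row lt rt (rt ++ "." ++ col) hl hr]
        by_cases hcl : (pvJoinDict left_row right_row lt rt).contains (lt ++ "." ++ col) = true
        · simp [hcl]
        · simp only [Bool.not_eq_true] at hcl
          by_cases hcr : (pvJoinDict left_row right_row lt rt).contains (rt ++ "." ++ col) = true
          · simp [hcl, hcr]
          · simp only [Bool.not_eq_true] at hcr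
            have hnone : (pvJoinDict left_row right_row lt rt).getD (rt ++ "." ++ col) none = none := by
              rw [PySem.Dict.contains_eq_isSome_get?] at hcr
              rw [PySem.Dict.getD_eq_get?_getD]
              cases hx : (pvJoinDict left_row right_row lt rt).get? (rt ++ "." ++ col) with
              | none => rfl
              | some v => rw [hx] at hcr; simp at hcr
            simp [hcl, hcr, hnone]
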